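-- pv_equiv track=rewrite | github.com/DiniIrdina/Basic_Algorithms_DataStructures | Dynamic_Programming.py | best_itinerary
-- ===== SOURCE A (Python) =====
-- def best_itinerary(profit, quarantine_time, home):
--     """This function accepts three inputs, a list of lists called profits, where profit[d][c] represents the profit
--         attainable by working in city c on day d, as well as a list of non-negative integers, quarantine_time, where each
--         item represents the number of quarantine days required by each city. The final input is home, an integer that
--         represents the city that we start in. The function decides whether to stay, travel, or quarantine in order to
--         obtain the optimum profit. To do this, it checks the previous items in the memo to gauge if it more profitable
--         to add to the existing pattern(previous day, same city), or if it is better to have traveled from the previous city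
--         and to start working at the current city today. In this implementation, we select the maximum profit from the last
--         position (final day) in the memo and returns this result.
--
--         Example Input: profit = [[6, 9, 7, 5, 9],[4, 7, 3, 10, 9],[7, 5, 4, 2, 8],[2, 7, 10, 9, 5],[2, 5, 2, 6, 1],
--                                  [4, 9, 4, 10, 6],[2, 2, 4, 8, 7],[4, 10, 2, 7, 4]]
--                        quarantine_time = [3,1,1,1,1]
--                        best_itinerary(profit, quarantine_time, 0)
--         Example Output: 39
--
--         Time Complexity: Worst-case complexity of O(nd) where n is the number of cities, and d is the number of days.
--                          Best-case complexity is the same as worst-case O(nd).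
--         Space Complexity: O(nd) where n is the number of cities and d is the number of cities."""
--
--     memo = [[None]] * (len(profit)+1)
--
--     for i in range(len(memo)):
--         memo[i] = [0] * len(quarantine_time)
--
--     for i in range(1,len(memo)):
--         memo[i][home] = memo[i-1][home]+profit[i-1][home]
--
--     for day in range(1, len(profit) + 1):
--         for city in range(len(quarantine_time)):
--             moveDays = abs(city-home)
--             if city != home:
--                 moveDays += quarantine_time[city]
--             if moveDays >= day:
--                 continue
--             differenceDay = day - moveDays
--             if city >= home:
--                 startHere = memo[differenceDay - 1][city - 1] + profit[day - 1][city]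
--             else:
--                 startHere = memo[differenceDay - 1][city + 1] + profit[day - 1][city]
--             previousStart = memo[day-1][city] + profit[day-1][city]
--             if startHere > previousStart:
--                 memo[day][city] = startHere
--             else:
--                 memo[day][city] = previousStart
--     return (max(memo[-1]))
-- ===== SOURCE B (Python) =====
-- def best_itinerary(profit, quarantine_time, home):
--     if not profit:
--         return 0
--     n = len(quarantine_time)
--     if not 0 <= home < n:
--         raise ValueError("home must be a valid city index")
--     cache = {}
--
--     def row(day):
--         """Best profits for every city after `day` days, computed on demand."""
--         if day == 0:
--             return [0] * n
--         if day in cache: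
--             return cache[day]
--         r = []
--         for city in range(n):
--             move = abs(city - home)
--             if city != home:
--                 move += quarantine_time[city]
--             if move >= day:
--                 r.append(0)
--             else:
--                 arrive = row(day - move - 1)
--                 stay = row(day - 1)
--                 came = arrive[city - 1] if city >= home else arrive[city + 1]
--                 r.append(max(came, stay[city]) + profit[day - 1][city])
--         cache[day] = r
--         return r
--
--     return max(row(len(profit)))
-- ===== Notes on version B (the rewrite author's own statement) =====
-- stated objective: alternative
-- what changed: Replaced the bottom-up table (with its dead home-column presetting pass) by a top-down recursion row(day) that builds each day's row of best profits on demand, memoized in a dict, returning the maximum of the final row (with an early base case for an empty profit list and a ValueError on an out-of-range start city); when profit is nonempty, Pre_ excludes a start city outside the city range (B raises there; A raises or returns negative-index-wraparound values) and cities whose total move time (distance plus quarantine) is negative, i.e. …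
-- outside the precondition, e.g. on best_itinerary([[4, 1, 0]], [-3, -1, 0], 2): A returns 4, B raises RecursionError; on best_itinerary([[1, 2], [3, 4]], [0, 0], -1): A returns 6, B raises ValueError
import Mathlib
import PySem

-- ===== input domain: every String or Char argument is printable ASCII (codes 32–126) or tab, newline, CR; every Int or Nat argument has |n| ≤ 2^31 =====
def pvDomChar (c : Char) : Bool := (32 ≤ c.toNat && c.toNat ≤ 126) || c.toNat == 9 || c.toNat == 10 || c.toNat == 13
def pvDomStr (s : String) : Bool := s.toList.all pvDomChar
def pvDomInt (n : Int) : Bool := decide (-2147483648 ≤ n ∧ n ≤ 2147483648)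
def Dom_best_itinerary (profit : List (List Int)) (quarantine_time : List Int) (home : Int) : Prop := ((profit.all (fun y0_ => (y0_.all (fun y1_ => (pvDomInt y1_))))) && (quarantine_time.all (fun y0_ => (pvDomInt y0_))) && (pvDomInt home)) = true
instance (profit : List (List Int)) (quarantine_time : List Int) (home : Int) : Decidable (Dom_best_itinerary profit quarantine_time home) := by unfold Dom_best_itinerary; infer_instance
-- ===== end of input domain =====

-- B replaces A's bottom-up table (with its dead home-column presetting pass) by a top-down
-- recursion computing each day's row on demand, memoized in a dict (objective: alternative
-- decomposition, same cost).

-- shared transliteration helpers (the identical lines appear verbatim in both Pythons):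
-- m[i][j] read with default 0 (Python indexing: negative index wraps; in range on all admitted reads)
def pvCell (m : List (List Int)) (i j : Int) : Int :=
  PySem.List.pyGetD (PySem.List.pyGetD m i []) j 0
-- moveDays = abs(city-home) (+ quarantine_time[city] if city != home)
def pvMove (quarantine_time : List Int) (home city : Int) : Int :=
  |city - home| + (if city ≠ home then PySem.List.pyGetD quarantine_time city 0 else 0)

-- ===== PORT A =====
-- memo[i][j] = v  (exact for 0 ≤ i < len, 0 ≤ j < row len — all writes A performs inside Pre_)
def pvSetCell (m : List (List Int)) (i j : Int) (v : Int) : List (List Int) :=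
  m.set i.toNat ((m.getD i.toNat []).set j.toNat v)

def best_itinerary (profit : List (List Int)) (quarantine_time : List Int) (home : Int) : Int :=
  let n := quarantine_time.length
  let d := profit.length
  -- memo = [[None]]*(len(profit)+1); for i in range(len(memo)): memo[i] = [0]*len(quarantine_time)
  let memo : List (List Int) := (List.range (d+1)).map (fun _ => List.replicate n (0:Int))
  -- for i in range(1, len(memo)): memo[i][home] = memo[i-1][home] + profit[i-1][home]
  let memo := (PySem.List.pyRange 1 ((d:Int)+1) 1).foldl
    (fun memo i => pvSetCell memo i home (pvCell memo (i-1) home + pvCell profit (i-1) home)) memo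
  let memo := (PySem.List.pyRange 1 ((d:Int)+1) 1).foldl (fun memo day =>
    (PySem.List.pyRange 0 (n:Int) 1).foldl (fun memo city =>
      let moveDays := pvMove quarantine_time home city
      if moveDays ≥ day then memo   -- continue
      else
        let differenceDay := day - moveDays
        let startHere :=
          (if city ≥ home then pvCell memo (differenceDay - 1) (city - 1)
           else pvCell memo (differenceDay - 1) (city + 1)) + pvCell profit (day - 1) city
        let previousStart := pvCell memo (day - 1) city + pvCell profit (day - 1) city
        if startHere > previousStart then pvSetCell memo day city startHere
        else pvSetCell memo day city previousStart) memo) memo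
  (PySem.List.max? (PySem.List.pyGetD memo (-1) []) (fun y => y)).getD 0  -- max(memo[-1]); nonempty inside Pre_

-- ===== PORT B =====
-- row(day) with the cache threaded through; fuel (= days+1 at top level) only makes the
-- recursion total in Lean — it is never exhausted on inputs satisfying Pre_.
def pvRowB (P : List (List Int)) (Q : List Int) (H : Int) (n : Nat) :
    Nat → Int → PySem.Dict Int (List Int) → List Int × PySem.Dict Int (List Int)
  | 0, _, cache => ([], cache)
  | fuel+1, day, cache =>
    if day = 0 then (List.replicate n (0:Int), cache)
    else
      match cache.get? day with
      | some r => (r, cache)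
      | none =>
        let rc := (PySem.List.pyRange 0 (n:Int) 1).foldl (fun rc city =>
          let move := pvMove Q H city
          if move ≥ day then (rc.1 ++ [(0:Int)], rc.2)
          else
            let p1 := pvRowB P Q H n fuel (day - move - 1) rc.2
            let p2 := pvRowB P Q H n fuel (day - 1) p1.2
            let came := if city ≥ H then PySem.List.pyGetD p1.1 (city - 1) 0
                        else PySem.List.pyGetD p1.1 (city + 1) 0
            (rc.1 ++ [max came (PySem.List.pyGetD p2.1 city 0) + pvCell P (day - 1) city], p2.2))
          (([] : List Int), cache)
        (rc.1, rc.2.insert day rc.1)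

def best_itinerary_alt (profit : List (List Int)) (quarantine_time : List Int) (home : Int) : Int :=
  if profit = [] then 0
  else
    let n := quarantine_time.length
    -- if not 0 <= home < n: raise ValueError — outside Pre_; the port returns 0 there
    if ¬ (0 ≤ home ∧ home < (n:Int)) then 0
    else
      (PySem.List.max?
        (pvRowB profit quarantine_time home n (profit.length+1) (profit.length:Int)
          (PySem.Dict.empty : PySem.Dict Int (List Int))).1 (fun y => y)).getD 0

-- ===== PRECONDITION & SPEC =====
-- Pre_ excludes (i) the inputs on which A raises — an empty city list, or a profit row missing
-- a city reachable on its day — and, when profit is nonempty, (ii) a city whose total move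
-- time (distance plus quarantine) is negative, i.e. a quarantine time below minus the distance
-- (outside the function's documented non-negative quarantine domain), and (iii) a start city
-- outside the city range: there A returns values leaking its dead home-column preset through
-- not-yet-computed memo rows (or raises), and B's recursion need not terminate.
def Pre_best_itinerary (profit : List (List Int)) (quarantine_time : List Int) (home : Int) : Prop :=
  quarantine_time ≠ [] ∧
  (profit = [] ∨
    (0 ≤ home ∧ home < quarantine_time.length ∧
     (∀ c < quarantine_time.length,
       0 ≤ |(c:Int) - home| + (if (c:Int) ≠ home then quarantine_time.getD c 0 else 0)) ∧
     (∀ d < profit.length, ∀ c < quarantine_time.length,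
       |(c:Int) - home| + (if (c:Int) ≠ home then quarantine_time.getD c 0 else 0) ≤ (d:Int) →
         c < (profit.getD d []).length)))
instance (profit : List (List Int)) (quarantine_time : List Int) (home : Int) : Decidable (Pre_best_itinerary profit quarantine_time home) := by unfold Pre_best_itinerary; infer_instance

def pvWitness_best_itinerary : List (List Int) × List Int × Int := ([[1, 2], [3, 4]], [0, 1], 0)

def Spec_best_itinerary (profit : List (List Int)) (quarantine_time : List Int) (home : Int) (out : Int) : Prop := out = best_itinerary_alt profit quarantine_time home
instance (profit : List (List Int)) (quarantine_time : List Int) (home : Int) (out : Int) : Decidable (Spec_best_itinerary profit quarantine_time home out) := by unfold Spec_best_itinerary; infer_instance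

-- ===== CLAIM (what is proved, stated in full; the proofs are below) =====
def Claim_equal_best_itinerary : Prop := ∀ (profit : List (List Int)) (quarantine_time : List Int) (home : Int), Dom_best_itinerary profit quarantine_time home → Pre_best_itinerary profit quarantine_time home → Spec_best_itinerary profit quarantine_time home (best_itinerary profit quarantine_time home)

-- ===== LEMMAS AND PROOFS =====

-- the common recurrence both programs compute: F 0 c = 0; F (d+1) c = 0 if moveDays ≥ d+1,
-- else max (F (d - moveDays) nb) (F d c) + profit[d][c]
def pvFF (profit : List (List Int)) (quarantine_time : List Int) (home n : Int) : Nat → Int → Int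
  | 0, _ => 0
  | (d+1), c =>
    let m := pvMove quarantine_time home c
    if m ≥ ((d:Int)+1) then 0
    else
      let nb := if c ≥ home then PySem.Int.mod (c - 1) n else c + 1
      max (pvFF profit quarantine_time home n (d - m.toNat) nb)
          (pvFF profit quarantine_time home n d c) + pvCell profit (d:Int) c
  termination_by d _ => d
  decreasing_by · omega
                · omega

-- ---- generic map-range list lemmas ----
theorem pvGetD_map_range {a : Type} (f : Nat → a) (n : Nat) (c : Int) (dflt : a)
    (h0 : 0 ≤ c) (hc : c < (n:Int)) :
    PySem.List.pyGetD ((List.range n).map f) c dflt = f c.toNat := by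
  have hlen : ((List.range n).map f).length = n := by simp
  rw [PySem.List.pyGetD_eq_getElem _ dflt h0 (by simp; omega)]
  simp

theorem pvGetD_map_range_neg_one {a : Type} (f : Nat → a) (n : Nat) (dflt : a) (hn : 0 < n) :
    PySem.List.pyGetD ((List.range n).map f) (-1) dflt = f (n-1) := by
  have hne : ((List.range n).map f) ≠ [] := by simp; omega
  rw [PySem.List.pyGetD_neg_one _ dflt hne]
  rw [List.getLast_eq_getElem]
  simp

theorem pvSet_map_range {a : Type} (f : Nat → a) (n i : Nat) (v : a) :
    ((List.range n).map f).set i v = (List.range n).map (fun t => if t = i then v else f t) := by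
  apply List.ext_getElem
  · simp
  · intro t h1 h2
    simp only [List.getElem_set, List.getElem_map, List.getElem_range]
    simp at h1
    by_cases h : i = t
    · simp [h]
    · simp [h]
      intro h'
      exact absurd h'.symm h

theorem pvCell_map_range (g : Nat → List Int) (m : Nat) (i j : Int)
    (h0 : 0 ≤ i) (hm : i < (m:Int)) :
    pvCell ((List.range m).map g) i j = PySem.List.pyGetD (g i.toNat) j 0 := by
  unfold pvCell
  rw [pvGetD_map_range g m i [] h0 hm]

theorem pvSetCell_map_range (g : Nat → List Int) (m i : Nat) (hm : i < m) (j : Int) (v : Int) :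
    pvSetCell ((List.range m).map g) (i:Int) j v
      = (List.range m).map (fun t => if t = i then (g i).set j.toNat v else g t) := by
  unfold pvSetCell
  have h1 : ((i:Int)).toNat = i := by omega
  rw [h1]
  have h2 : ((List.range m).map g).getD i [] = g i := by
    rw [List.getD_eq_getElem _ _ (by simp; omega)]
    simp [List.getElem_map, List.getElem_range]
  rw [h2, pvSet_map_range]

-- ---- proof-side names for port A's loop bodies (definitionally the port's lambdas) ----
def pvStep1 (P : List (List Int)) (H : Int) : List (List Int) → Int → List (List Int) :=
  fun memo i => pvSetCell memo i H (pvCell memo (i-1) H + pvCell P (i-1) H)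

def pvInner (P : List (List Int)) (Q : List Int) (H : Int) (day : Int) :
    List (List Int) → Int → List (List Int) :=
  fun memo city =>
    let moveDays := pvMove Q H city
    if moveDays ≥ day then memo
    else
      let differenceDay := day - moveDays
      let startHere :=
        (if city ≥ H then pvCell memo (differenceDay - 1) (city - 1)
         else pvCell memo (differenceDay - 1) (city + 1)) + pvCell P (day - 1) city
      let previousStart := pvCell memo (day - 1) city + pvCell P (day - 1) city
      if startHere > previousStart then pvSetCell memo day city startHere
      else pvSetCell memo day city previousStart

def pvStep2 (P : List (List Int)) (Q : List Int) (H : Int) :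
    List (List Int) → Int → List (List Int) :=
  fun memo day => (PySem.List.pyRange 0 (Q.length:Int) 1).foldl (pvInner P Q H day) memo

-- ---- the rows the table passes through ----
def pvS (P : List (List Int)) (H : Int) : Nat → Int
  | 0 => 0
  | i+1 => pvS P H i + pvCell P (i:Int) H

def pvPreRow (P : List (List Int)) (Q : List Int) (H : Int) (i : Nat) : List Int :=
  (List.range Q.length).map (fun c : Nat => if (c:Int) = H then pvS P H i else 0)

def pvRowF (P : List (List Int)) (Q : List Int) (H : Int) (i : Nat) : List Int :=
  (List.range Q.length).map (fun c : Nat => pvFF P Q H (Q.length:Int) i (c:Int))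

def pvMid (P : List (List Int)) (Q : List Int) (H : Int) (a c0 : Nat) : List Int :=
  (List.range Q.length).map (fun c : Nat =>
    if c < c0 then pvFF P Q H (Q.length:Int) a (c:Int)
    else if (c:Int) = H then pvS P H a else 0)

theorem pvPreRow_set (P : List (List Int)) (Q : List Int) (H : Int)
    (h0 : 0 ≤ H) (_hh : H < (Q.length:Int)) (i : Nat) :
    (List.replicate Q.length (0:Int)).set H.toNat (pvS P H i) = pvPreRow P Q H i := by
  unfold pvPreRow
  apply List.ext_getElem
  · simp
  · intro t h1 h2
    simp only [List.getElem_set, List.getElem_replicate, List.getElem_map, List.getElem_range]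
    simp at h1
    by_cases h : H.toNat = t
    · rw [if_pos h, if_pos (by omega)]
    · rw [if_neg h, if_neg (by omega)]

theorem pvPreRow_zero (P : List (List Int)) (Q : List Int) (H : Int) :
    pvPreRow P Q H 0 = List.replicate Q.length 0 := by
  unfold pvPreRow
  apply List.ext_getElem
  · simp
  · intro t h1 h2
    simp [pvS]

theorem pvRowF_zero (P : List (List Int)) (Q : List Int) (H : Int) :
    pvRowF P Q H 0 = pvPreRow P Q H 0 := by
  unfold pvRowF pvPreRow
  apply List.map_congr_left
  intro t _
  simp [pvFF, pvS]

theorem pvMid_zero (P : List (List Int)) (Q : List Int) (H : Int) (a : Nat) :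
    pvMid P Q H a 0 = pvPreRow P Q H a := by
  unfold pvMid pvPreRow
  apply List.map_congr_left
  intro c _
  rw [if_neg (by omega)]

theorem pvMid_full (P : List (List Int)) (Q : List Int) (H : Int) (a : Nat) :
    pvMid P Q H a Q.length = pvRowF P Q H a := by
  unfold pvMid pvRowF
  apply List.map_congr_left
  intro c hc
  simp only [List.mem_range] at hc
  rw [if_pos hc]

theorem pvMove_natCast (Q : List Int) (H : Int) (c : Nat) :
    pvMove Q H (c:Int) = |(c:Int) - H| + (if (c:Int) ≠ H then Q.getD c 0 else 0) := by
  unfold pvMove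
  rw [PySem.List.pyGetD_natCast]

-- pvFF is 0 whenever moving takes at least the whole stay
theorem pvFF_of_unreachable (P : List (List Int)) (Q : List Int) (H n : Int) (d : Nat) (c : Int)
    (h : pvMove Q H c ≥ (d:Int)) : pvFF P Q H n d c = 0 := by
  cases d with
  | zero => simp [pvFF]
  | succ d =>
    rw [pvFF]
    rw [if_pos (by push_cast at h ⊢; omega)]

-- ---- A-side: the preset loop ----
theorem pvA_preset (P : List (List Int)) (Q : List Int) (H : Int)
    (h0h : 0 ≤ H) (hh : H < (Q.length:Int)) :
    ∀ (b a : Nat), a + b = P.length + 1 → 1 ≤ a →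
      (PySem.List.pyRange (a:Int) ((P.length:Int)+1) 1).foldl (pvStep1 P H)
          ((List.range (P.length+1)).map (fun t => if t < a then pvPreRow P Q H t else List.replicate Q.length 0))
        = (List.range (P.length+1)).map (pvPreRow P Q H) := by
  intro b
  induction b with
  | zero =>
    intro a hab _
    rw [PySem.List.pyRange_one_eq_nil (by omega), List.foldl_nil]
    apply List.map_congr_left
    intro t ht
    simp at ht
    rw [if_pos (by omega)]
  | succ b ih =>
    intro a hab ha
    rw [PySem.List.pyRange_one_cons (by omega), List.foldl_cons]
    have hstep : pvStep1 P H
        ((List.range (P.length+1)).map (fun t => if t < a then pvPreRow P Q H t else List.replicate Q.length 0)) (a:Int)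
        = (List.range (P.length+1)).map (fun t => if t < a+1 then pvPreRow P Q H t else List.replicate Q.length 0) := by
      unfold pvStep1
      have e1 : pvCell ((List.range (P.length+1)).map (fun t => if t < a then pvPreRow P Q H t else List.replicate Q.length 0)) ((a:Int)-1) H = pvS P H (a-1) := by
        rw [pvCell_map_range _ (P.length+1) _ H (by omega) (by push_cast; omega)]
        have ht : ((a:Int)-1).toNat = a-1 := by omega
        rw [ht, if_pos (by omega)]
        unfold pvPreRow
        rw [pvGetD_map_range _ Q.length H 0 h0h hh]
        rw [if_pos (by omega)]
      rw [e1]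
      have hcast : (a:Int) = ((a:Nat):Int) := rfl
      rw [pvSetCell_map_range _ (P.length+1) a (by omega) H _]
      have e2 : pvS P H a = pvS P H (a-1) + pvCell P ((a:Int)-1) H := by
        conv_lhs => rw [show a = (a-1)+1 from by omega]
        rw [pvS]
        have : (((a-1):Nat):Int) = (a:Int)-1 := by omega
        rw [this]
      rw [← e2, if_neg (by omega)]
      rw [pvPreRow_set P Q H h0h hh a]
      apply List.map_congr_left
      intro t ht
      simp at ht
      by_cases h : t = a
      · rw [if_pos h, if_pos (by omega), h]
      · rw [if_neg h]
        by_cases h' : t < a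
        · rw [if_pos h', if_pos (by omega)]
        · rw [if_neg h', if_neg (by omega)]
    rw [hstep]
    have hcast : (a:Int) + 1 = ((a+1:Nat):Int) := by push_cast; ring
    rw [hcast]
    exact ih (a+1) (by omega) (by omega)

-- ---- A-side: one inner (city) loop pass ----
theorem pvA_inner (P : List (List Int)) (Q : List Int) (H : Int)
    (h0h : 0 ≤ H) (hh : H < (Q.length:Int)) (hmv : ∀ c : Nat, c < Q.length → 0 ≤ pvMove Q H (c:Int))
    (a : Nat) (ha1 : 1 ≤ a) (ha2 : a ≤ P.length) :
    ∀ (bc c0 : Nat), c0 + bc = Q.length →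
      (PySem.List.pyRange (c0:Int) ((Q.length:Int)) 1).foldl (pvInner P Q H (a:Int))
          ((List.range (P.length+1)).map (fun t =>
            if t < a then pvRowF P Q H t else if t = a then pvMid P Q H a c0 else pvPreRow P Q H t))
        = (List.range (P.length+1)).map (fun t =>
            if t < a then pvRowF P Q H t else if t = a then pvMid P Q H a Q.length else pvPreRow P Q H t) := by
  intro bc
  induction bc with
  | zero =>
    intro c0 hc
    have hc' : c0 = Q.length := by omega
    subst hc'
    rw [PySem.List.pyRange_one_eq_nil (by omega), List.foldl_nil]
  | succ bc ih =>
    intro c0 hc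
    have hc0 : c0 < Q.length := by omega
    have hn1 : 1 ≤ Q.length := by omega
    rw [PySem.List.pyRange_one_cons (by omega), List.foldl_cons]
    have hstep : pvInner P Q H (a:Int)
        ((List.range (P.length+1)).map (fun t =>
          if t < a then pvRowF P Q H t else if t = a then pvMid P Q H a c0 else pvPreRow P Q H t)) (c0:Int)
        = (List.range (P.length+1)).map (fun t =>
          if t < a then pvRowF P Q H t else if t = a then pvMid P Q H a (c0+1) else pvPreRow P Q H t) := by
      unfold pvInner
      simp only
      by_cases hm : pvMove Q H (c0:Int) ≥ (a:Int)
      · rw [if_pos hm]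
        apply List.map_congr_left
        intro t ht
        by_cases hta : t = a
        · subst hta
          rw [if_neg (show ¬ t < t from by omega), if_pos rfl]
          rw [if_neg (show ¬ t < t from by omega), if_pos rfl]
          unfold pvMid
          apply List.map_congr_left
          intro c hcm
          simp only [List.mem_range] at hcm
          by_cases hcc : c < c0
          · rw [if_pos hcc, if_pos (by omega)]
          · rw [if_neg hcc]
            by_cases hce : c = c0
            · subst hce
              have hcH : ¬ (c:Int) = H := by
                intro hEq
                have : pvMove Q H (c:Int) = 0 := by
                  unfold pvMove
                  rw [hEq]
                  simp
                omega
              rw [if_neg hcH, if_pos (show c < c+1 from by omega)]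
              exact (pvFF_of_unreachable P Q H (Q.length:Int) t (c:Int) (by omega)).symm
            · rw [if_neg (show ¬ c < c0+1 from by omega)]
        · by_cases h' : t < a
          · rw [if_pos h', if_pos h']
          · rw [if_neg h', if_neg h', if_neg hta, if_neg hta]
      · rw [if_neg hm]
        have hm0 : 0 ≤ pvMove Q H (c0:Int) := hmv c0 hc0
        have hmlt : pvMove Q H (c0:Int) < (a:Int) := by omega
        -- previousStart's memo read
        have e_prev : pvCell ((List.range (P.length+1)).map (fun t =>
              if t < a then pvRowF P Q H t else if t = a then pvMid P Q H a c0 else pvPreRow P Q H t))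
              ((a:Int)-1) (c0:Int) = pvFF P Q H (Q.length:Int) (a-1) (c0:Int) := by
          rw [pvCell_map_range _ (P.length+1) _ _ (by omega) (by push_cast; omega)]
          rw [show ((a:Int)-1).toNat = a-1 from by omega, if_pos (by omega)]
          unfold pvRowF
          rw [pvGetD_map_range _ Q.length _ 0 (by omega) (by omega)]
          rw [show ((c0:Int)).toNat = c0 from by omega]
        -- startHere's memo read
        set k : Nat := a - 1 - (pvMove Q H (c0:Int)).toNat with hk
        have hkeq : ((a:Int) - pvMove Q H (c0:Int) - 1).toNat = k := by omega
        have e_rowk : ∀ j : Int, 0 ≤ j → j < (Q.length:Int) →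
            pvCell ((List.range (P.length+1)).map (fun t =>
              if t < a then pvRowF P Q H t else if t = a then pvMid P Q H a c0 else pvPreRow P Q H t))
              ((a:Int) - pvMove Q H (c0:Int) - 1) j = pvFF P Q H (Q.length:Int) k j := by
          intro j hj0 hj1
          rw [pvCell_map_range _ (P.length+1) _ _ (by omega) (by push_cast; omega)]
          rw [hkeq, if_pos (by omega)]
          unfold pvRowF
          rw [pvGetD_map_range _ Q.length _ 0 hj0 hj1]
          congr 1
          omega
        have e_neg : pvCell ((List.range (P.length+1)).map (fun t =>
              if t < a then pvRowF P Q H t else if t = a then pvMid P Q H a c0 else pvPreRow P Q H t))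
              ((a:Int) - pvMove Q H (c0:Int) - 1) (-1) = pvFF P Q H (Q.length:Int) k ((Q.length-1 : Nat):Int) := by
          rw [pvCell_map_range _ (P.length+1) _ _ (by omega) (by push_cast; omega)]
          rw [hkeq, if_pos (by omega)]
          unfold pvRowF
          rw [pvGetD_map_range_neg_one _ Q.length 0 (by omega)]
        -- the neighbour read equals pvFF's neighbour term
        have e_nb : (if (c0:Int) ≥ H then
              pvCell ((List.range (P.length+1)).map (fun t =>
                if t < a then pvRowF P Q H t else if t = a then pvMid P Q H a c0 else pvPreRow P Q H t))
                ((a:Int) - pvMove Q H (c0:Int) - 1) ((c0:Int) - 1)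
            else
              pvCell ((List.range (P.length+1)).map (fun t =>
                if t < a then pvRowF P Q H t else if t = a then pvMid P Q H a c0 else pvPreRow P Q H t))
                ((a:Int) - pvMove Q H (c0:Int) - 1) ((c0:Int) + 1))
            = pvFF P Q H (Q.length:Int) k
                (if (c0:Int) ≥ H then PySem.Int.mod ((c0:Int) - 1) (Q.length:Int) else (c0:Int) + 1) := by
          by_cases hch : (c0:Int) ≥ H
          · rw [if_pos hch, if_pos hch]
            by_cases hcz : c0 = 0
            · subst hcz
              rw [show ((0:Nat):Int) - 1 = (-1:Int) from by omega]
              rw [e_neg]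
              congr 1
              rw [PySem.Int.mod_eq_emod_of_pos (show (0:Int) < (Q.length:Int) from by omega)]
              rw [show (-1 : Int) = ((Q.length:Int) - 1) + (-1) * (Q.length:Int) from by ring]
              rw [Int.add_mul_emod_self_right]
              rw [Int.emod_eq_of_lt (by omega) (by omega)]
              omega
            · rw [e_rowk _ (by omega) (by omega)]
              congr 1
              rw [PySem.Int.mod_eq_emod_of_pos (show (0:Int) < (Q.length:Int) from by omega)]
              rw [Int.emod_eq_of_lt (by omega) (by omega)]
          · rw [if_neg hch, if_neg hch]
            rw [e_rowk _ (by omega) (by omega)]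
        rw [e_prev, e_nb]
        -- the two set branches are one set of the max
        have e_max : ∀ (memo : List (List Int)) (s p : Int),
            (if s + pvCell P ((a:Int)-1) (c0:Int) > p + pvCell P ((a:Int)-1) (c0:Int)
             then pvSetCell memo (a:Int) (c0:Int) (s + pvCell P ((a:Int)-1) (c0:Int))
             else pvSetCell memo (a:Int) (c0:Int) (p + pvCell P ((a:Int)-1) (c0:Int)))
            = pvSetCell memo (a:Int) (c0:Int) (max s p + pvCell P ((a:Int)-1) (c0:Int)) := by
          intro memo s p
          by_cases h : s ≤ p
          · rw [if_neg (by omega), max_eq_right h]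
          · rw [if_pos (by omega), max_eq_left (by omega)]
        rw [e_max]
        have e_val : max (pvFF P Q H (Q.length:Int) k
                (if (c0:Int) ≥ H then PySem.Int.mod ((c0:Int) - 1) (Q.length:Int) else (c0:Int) + 1))
              (pvFF P Q H (Q.length:Int) (a-1) (c0:Int)) + pvCell P ((a:Int)-1) (c0:Int)
            = pvFF P Q H (Q.length:Int) a (c0:Int) := by
          conv_rhs => rw [show a = (a-1)+1 from by omega]
          rw [pvFF]
          rw [if_neg (show ¬ pvMove Q H (c0:Int) ≥ ((a-1:Nat):Int)+1 from by omega)]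
          simp only
          rw [show ((a-1:Nat):Int) = (a:Int)-1 from by omega, ← hk]
        rw [e_val]
        rw [pvSetCell_map_range _ (P.length+1) a (by omega) _ _]
        apply List.map_congr_left
        intro t ht
        simp only [List.mem_range] at ht
        by_cases hta : t = a
        · subst hta
          rw [if_pos rfl]
          rw [if_neg (show ¬ t < t from by omega), if_pos rfl]
          rw [if_neg (show ¬ t < t from by omega), if_pos rfl]
          unfold pvMid
          rw [show ((c0:Int)).toNat = c0 from by omega]
          rw [pvSet_map_range]
          apply List.map_congr_left
          intro c hcm
          simp only [List.mem_range] at hcm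
          by_cases hce : c = c0
          · subst hce
            rw [if_pos rfl, if_pos (show c < c+1 from by omega)]
          · rw [if_neg hce]
            by_cases hcc : c < c0
            · rw [if_pos hcc, if_pos (show c < c0+1 from by omega)]
            · rw [if_neg hcc, if_neg (show ¬ c < c0+1 from by omega)]
        · rw [if_neg hta]
          by_cases h' : t < a
          · rw [if_pos h', if_pos h']
          · rw [if_neg h', if_neg h', if_neg hta, if_neg hta]
    rw [hstep]
    rw [show (c0:Int) + 1 = ((c0+1:Nat):Int) from by push_cast; ring]
    exact ih (c0+1) (by omega)

-- ---- A-side: the day loop ----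
theorem pvA_main (P : List (List Int)) (Q : List Int) (H : Int)
    (h0h : 0 ≤ H) (hh : H < (Q.length:Int)) (hmv : ∀ c : Nat, c < Q.length → 0 ≤ pvMove Q H (c:Int)) :
    ∀ (b a : Nat), a + b = P.length + 1 → 1 ≤ a →
      (PySem.List.pyRange (a:Int) ((P.length:Int)+1) 1).foldl (pvStep2 P Q H)
          ((List.range (P.length+1)).map (fun t => if t < a then pvRowF P Q H t else pvPreRow P Q H t))
        = (List.range (P.length+1)).map (pvRowF P Q H) := by
  intro b
  induction b with
  | zero =>
    intro a hab _
    rw [PySem.List.pyRange_one_eq_nil (by omega), List.foldl_nil]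
    apply List.map_congr_left
    intro t ht
    simp only [List.mem_range] at ht
    rw [if_pos (by omega)]
  | succ b ih =>
    intro a hab ha
    have ha2 : a ≤ P.length := by omega
    rw [PySem.List.pyRange_one_cons (by omega), List.foldl_cons]
    have hstep : pvStep2 P Q H
        ((List.range (P.length+1)).map (fun t => if t < a then pvRowF P Q H t else pvPreRow P Q H t)) (a:Int)
        = (List.range (P.length+1)).map (fun t => if t < a+1 then pvRowF P Q H t else pvPreRow P Q H t) := by
      unfold pvStep2
      have hstart : ((List.range (P.length+1)).map (fun t => if t < a then pvRowF P Q H t else pvPreRow P Q H t))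
          = (List.range (P.length+1)).map (fun t =>
              if t < a then pvRowF P Q H t else if t = a then pvMid P Q H a 0 else pvPreRow P Q H t) := by
        apply List.map_congr_left
        intro t _
        by_cases h1 : t < a
        · rw [if_pos h1, if_pos h1]
        · rw [if_neg h1, if_neg h1]
          by_cases h2 : t = a
          · rw [if_pos h2]
            subst h2
            exact (pvMid_zero P Q H t).symm
          · rw [if_neg h2]
      rw [hstart]
      have h0 := pvA_inner P Q H h0h hh hmv a ha ha2 Q.length 0 (by omega)
      simp only [Nat.cast_zero] at h0
      rw [h0]
      apply List.map_congr_left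
      intro t _
      by_cases h1 : t < a
      · rw [if_pos h1, if_pos (show t < a+1 from by omega)]
      · rw [if_neg h1]
        by_cases h2 : t = a
        · subst h2
          rw [if_pos rfl, if_pos (show t < t+1 from by omega)]
          exact pvMid_full P Q H t
        · rw [if_neg h2, if_neg (show ¬ t < a+1 from by omega)]
    rw [hstep, show (a:Int) + 1 = ((a+1:Nat):Int) from by push_cast; ring]
    exact ih (a+1) (by omega) (by omega)

-- ---- A-side: assembled ----
theorem pvA_value (P : List (List Int)) (Q : List Int) (H : Int)
    (h0h : 0 ≤ H) (hh : H < (Q.length:Int)) (hmv : ∀ c : Nat, c < Q.length → 0 ≤ pvMove Q H (c:Int)) :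
    best_itinerary P Q H
      = (PySem.List.max? (pvRowF P Q H P.length) (fun y => y)).getD 0 := by
  have hrfl : best_itinerary P Q H
      = (PySem.List.max? (PySem.List.pyGetD
          ((PySem.List.pyRange 1 ((P.length:Int)+1) 1).foldl (pvStep2 P Q H)
            ((PySem.List.pyRange 1 ((P.length:Int)+1) 1).foldl (pvStep1 P H)
              ((List.range (P.length+1)).map (fun _ => List.replicate Q.length (0:Int)))))
          (-1) []) (fun y => y)).getD 0 := rfl
  rw [hrfl]
  have hinit : ((List.range (P.length+1)).map (fun _ => List.replicate Q.length (0:Int)))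
      = (List.range (P.length+1)).map (fun t => if t < 1 then pvPreRow P Q H t else List.replicate Q.length 0) := by
    apply List.map_congr_left
    intro t _
    by_cases h : t < 1
    · rw [if_pos h]
      have : t = 0 := by omega
      subst this
      exact (pvPreRow_zero P Q H).symm
    · rw [if_neg h]
  rw [hinit]
  have h1 := pvA_preset P Q H h0h hh P.length 1 (by omega) (by omega)
  simp only [Nat.cast_one] at h1
  rw [h1]
  have hpre : (List.range (P.length+1)).map (pvPreRow P Q H)
      = (List.range (P.length+1)).map (fun t => if t < 1 then pvRowF P Q H t else pvPreRow P Q H t) := by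
    apply List.map_congr_left
    intro t _
    by_cases h : t < 1
    · rw [if_pos h]
      have : t = 0 := by omega
      subst this
      exact (pvRowF_zero P Q H).symm
    · rw [if_neg h]
  rw [hpre]
  have h2 := pvA_main P Q H h0h hh hmv P.length 1 (by omega) (by omega)
  simp only [Nat.cast_one] at h2
  rw [h2]
  rw [pvGetD_map_range_neg_one (pvRowF P Q H) (P.length+1) [] (by omega)]
  rw [show P.length + 1 - 1 = P.length from rfl]

-- ---- B-side ----
def pvInvB (P : List (List Int)) (Q : List Int) (H : Int) (cache : PySem.Dict Int (List Int)) : Prop :=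
  ∀ d r, cache.get? d = some r → r = pvRowF P Q H d.toNat

theorem pvRowF_zero_replicate (P : List (List Int)) (Q : List Int) (H : Int) :
    List.replicate Q.length (0:Int) = pvRowF P Q H 0 := by
  unfold pvRowF
  apply List.ext_getElem
  · simp
  · intro t h1 h2
    simp [pvFF]

theorem pvB_row (P : List (List Int)) (Q : List Int) (H : Int)
    (hh : H < (Q.length:Int)) (hmv : ∀ c : Nat, c < Q.length → 0 ≤ pvMove Q H (c:Int)) :
    ∀ (fuel : Nat) (day : Int) (cache : PySem.Dict Int (List Int)),
      0 ≤ day → day < (fuel:Int) → pvInvB P Q H cache →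
      (pvRowB P Q H Q.length fuel day cache).1 = pvRowF P Q H day.toNat
        ∧ pvInvB P Q H (pvRowB P Q H Q.length fuel day cache).2 := by
  intro fuel
  induction fuel with
  | zero => intro day cache h0 hlt _; exfalso; simp at hlt; omega
  | succ fuel ih =>
    intro day cache h0 hlt hinv
    rw [pvRowB]
    by_cases hday : day = 0
    · subst hday
      rw [if_pos rfl]
      exact ⟨(pvRowF_zero_replicate P Q H).symm ▸ (pvRowF_zero_replicate P Q H), hinv⟩
    · rw [if_neg hday]
      cases hget : cache.get? day with
      | some r =>
        simp only
        exact ⟨hinv day r hget, hinv⟩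
      | none =>
        simp only
        -- the inner city loop: row built left to right, cache threaded through
        have hfold : ∀ (bc c0 : Nat), c0 + bc = Q.length →
            ∀ (acc0 : List Int) (cch : PySem.Dict Int (List Int)), pvInvB P Q H cch →
            ((PySem.List.pyRange (c0:Int) ((Q.length:Nat):Int) 1).foldl (fun rc city =>
                let move := pvMove Q H city
                if move ≥ day then (rc.1 ++ [(0:Int)], rc.2)
                else
                  let p1 := pvRowB P Q H Q.length fuel (day - move - 1) rc.2
                  let p2 := pvRowB P Q H Q.length fuel (day - 1) p1.2
                  let came := if city ≥ H then PySem.List.pyGetD p1.1 (city - 1) 0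
                              else PySem.List.pyGetD p1.1 (city + 1) 0
                  (rc.1 ++ [max came (PySem.List.pyGetD p2.1 city 0) + pvCell P (day - 1) city], p2.2))
              (acc0, cch)).1
              = acc0 ++ (PySem.List.pyRange (c0:Int) ((Q.length:Nat):Int) 1).map
                  (fun c => pvFF P Q H (Q.length:Int) day.toNat c)
            ∧ pvInvB P Q H
              ((PySem.List.pyRange (c0:Int) ((Q.length:Nat):Int) 1).foldl (fun rc city =>
                let move := pvMove Q H city
                if move ≥ day then (rc.1 ++ [(0:Int)], rc.2)
                else
                  let p1 := pvRowB P Q H Q.length fuel (day - move - 1) rc.2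
                  let p2 := pvRowB P Q H Q.length fuel (day - 1) p1.2
                  let came := if city ≥ H then PySem.List.pyGetD p1.1 (city - 1) 0
                              else PySem.List.pyGetD p1.1 (city + 1) 0
                  (rc.1 ++ [max came (PySem.List.pyGetD p2.1 city 0) + pvCell P (day - 1) city], p2.2))
              (acc0, cch)).2 := by
          intro bc
          induction bc with
          | zero =>
            intro c0 hc acc0 cch hcinv
            rw [PySem.List.pyRange_one_eq_nil (by omega), List.foldl_nil, List.map_nil]
            exact ⟨by simp, hcinv⟩
          | succ bc ihc =>
            intro c0 hc acc0 cch hcinv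
            have hc0 : c0 < Q.length := by omega
            rw [PySem.List.pyRange_one_cons (by omega), List.foldl_cons, List.map_cons]
            simp only
            by_cases hm : pvMove Q H (c0:Int) ≥ day
            · rw [if_pos hm]
              have hz : pvFF P Q H (Q.length:Int) day.toNat (c0:Int) = 0 :=
                pvFF_of_unreachable P Q H (Q.length:Int) day.toNat (c0:Int) (by omega)
              rw [show (c0:Int) + 1 = ((c0+1:Nat):Int) from by push_cast; ring]
              have := ihc (c0+1) (by omega) (acc0 ++ [(0:Int)]) cch hcinv
              rw [this.1]
              refine ⟨?_, this.2⟩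
              rw [hz]
              simp
            · rw [if_neg hm]
              have hm0 : 0 ≤ pvMove Q H (c0:Int) := hmv c0 hc0
              set m := pvMove Q H (c0:Int) with hmdef
              have h1 := ih (day - m - 1) cch (by omega) (by push_cast at hlt ⊢; omega) hcinv
              have h2 := ih (day - 1) _ (by omega) (by push_cast at hlt ⊢; omega) h1.2
              set k : Nat := (day - m - 1).toNat with hk
              -- came = pvFF at the mod-neighbour
              have e_came : (if (c0:Int) ≥ H then
                    PySem.List.pyGetD (pvRowB P Q H Q.length fuel (day - m - 1) cch).1 ((c0:Int) - 1) 0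
                  else PySem.List.pyGetD (pvRowB P Q H Q.length fuel (day - m - 1) cch).1 ((c0:Int) + 1) 0)
                  = pvFF P Q H (Q.length:Int) k
                      (if (c0:Int) ≥ H then PySem.Int.mod ((c0:Int) - 1) (Q.length:Int) else (c0:Int) + 1) := by
                rw [h1.1]
                unfold pvRowF
                by_cases hch : (c0:Int) ≥ H
                · rw [if_pos hch, if_pos hch]
                  by_cases hcz : c0 = 0
                  · subst hcz
                    rw [show ((0:Nat):Int) - 1 = (-1:Int) from by omega]
                    rw [pvGetD_map_range_neg_one _ Q.length 0 (by omega)]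
                    congr 1
                    rw [PySem.Int.mod_eq_emod_of_pos (show (0:Int) < (Q.length:Int) from by omega)]
                    rw [show (-1 : Int) = ((Q.length:Int) - 1) + (-1) * (Q.length:Int) from by ring]
                    rw [Int.add_mul_emod_self_right]
                    rw [Int.emod_eq_of_lt (by omega) (by omega)]
                    omega
                  · rw [pvGetD_map_range _ Q.length _ 0 (by omega) (by omega)]
                    congr 1
                    rw [PySem.Int.mod_eq_emod_of_pos (show (0:Int) < (Q.length:Int) from by omega)]
                    rw [Int.emod_eq_of_lt (by omega) (by omega)]
                    omega
                · rw [if_neg hch, if_neg hch]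
                  rw [pvGetD_map_range _ Q.length _ 0 (by omega) (by omega)]
                  congr 1
              have e_stay : PySem.List.pyGetD
                    (pvRowB P Q H Q.length fuel (day - 1) (pvRowB P Q H Q.length fuel (day - m - 1) cch).2).1
                    (c0:Int) 0 = pvFF P Q H (Q.length:Int) (day - 1).toNat (c0:Int) := by
                rw [h2.1]
                unfold pvRowF
                rw [pvGetD_map_range _ Q.length _ 0 (by omega) (by omega)]
                rw [show ((c0:Int)).toNat = c0 from by omega]
              have e_val : max (pvFF P Q H (Q.length:Int) k
                      (if (c0:Int) ≥ H then PySem.Int.mod ((c0:Int) - 1) (Q.length:Int) else (c0:Int) + 1))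
                    (pvFF P Q H (Q.length:Int) (day - 1).toNat (c0:Int)) + pvCell P (day - 1) (c0:Int)
                  = pvFF P Q H (Q.length:Int) day.toNat (c0:Int) := by
                obtain ⟨dd, hdd⟩ : ∃ dd, day.toNat = dd + 1 := ⟨day.toNat - 1, by omega⟩
                rw [hdd]
                rw [pvFF]
                rw [if_neg (show ¬ pvMove Q H (c0:Int) ≥ ((dd:Int)+1) from by rw [← hmdef]; omega)]
                simp only
                congr 2
                · congr 1
                  · omega
                · congr 1
                  omega
                · omega
              rw [e_came, e_stay, e_val]
              rw [show (c0:Int) + 1 = ((c0+1:Nat):Int) from by push_cast; ring]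
              have := ihc (c0+1) (by omega)
                (acc0 ++ [pvFF P Q H (Q.length:Int) day.toNat (c0:Int)]) _ h2.2
              rw [this.1]
              exact ⟨by simp, this.2⟩
        have hmain := hfold Q.length 0 (by omega) [] cache hinv
        simp only [Nat.cast_zero] at hmain
        have hrow : (PySem.List.pyRange 0 ((Q.length:Nat):Int) 1).map
            (fun c => pvFF P Q H (Q.length:Int) day.toNat c) = pvRowF P Q H day.toNat := by
          rw [PySem.List.pyRange_one, List.map_map]
          unfold pvRowF
          apply List.ext_getElem
          · simp
          · intro t h1t h2t
            simp
        rw [List.nil_append] at hmain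
        refine ⟨by rw [hmain.1, hrow], ?_⟩
        intro dd r hr
        rw [PySem.Dict.get?_insert] at hr
        split at hr
        · rename_i hp
          subst hp
          cases hr
          rw [hmain.1, hrow]
        · exact hmain.2 dd r hr

theorem pvB_value (P : List (List Int)) (Q : List Int) (H : Int) (hP : P ≠ [])
    (h0h : 0 ≤ H) (hh : H < (Q.length:Int))
    (hmv : ∀ c : Nat, c < Q.length → 0 ≤ pvMove Q H (c:Int)) :
    best_itinerary_alt P Q H
      = (PySem.List.max? (pvRowF P Q H P.length) (fun y => y)).getD 0 := by
  have h := pvB_row P Q H hh hmv (P.length+1) (P.length:Int)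
    (PySem.Dict.empty : PySem.Dict Int (List Int)) (by omega) (by push_cast; omega)
    (by intro d r hr; rw [PySem.Dict.get?_empty] at hr; cases hr)
  simp only [best_itinerary_alt]
  rw [if_neg hP, if_neg (by simp only [not_not]; exact ⟨h0h, hh⟩)]
  rw [h.1]
  rw [show ((P.length:Int)).toNat = P.length from by omega]

-- with no days at all, both programs take the maximum of a row of zeros
theorem pv_nil (Q : List Int) (H : Int) :
    best_itinerary [] Q H = best_itinerary_alt [] Q H := by
  have hA : best_itinerary [] Q H
      = (PySem.List.max? (List.replicate Q.length (0:Int)) (fun y => y)).getD 0 := by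
    have hrfl : best_itinerary [] Q H
        = (PySem.List.max? (PySem.List.pyGetD
            ((PySem.List.pyRange 1 (((List.length ([] : List (List Int))):Int)+1) 1).foldl (pvStep2 [] Q H)
              ((PySem.List.pyRange 1 (((List.length ([] : List (List Int))):Int)+1) 1).foldl (pvStep1 [] H)
                ((List.range (List.length ([] : List (List Int)) + 1)).map (fun _ => List.replicate Q.length (0:Int)))))
            (-1) []) (fun y => y)).getD 0 := rfl
    rw [hrfl]
    rw [PySem.List.pyRange_one_eq_nil (by simp)]
    simp only [List.foldl_nil, List.length_nil, Nat.zero_add, List.range_one, List.map_cons,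
      List.map_nil]
    rw [PySem.List.pyGetD_neg_one _ [] (by simp)]
    simp
  have hmax : (PySem.List.max? (List.replicate Q.length (0:Int)) (fun y => y)).getD 0 = 0 := by
    cases hq : Q.length with
    | zero => simp [PySem.List.max?]
    | succ m =>
      rw [List.replicate_succ, PySem.List.max?_id_cons]
      have hfold : ∀ k : Nat, (List.replicate k (0:Int)).foldl max 0 = 0 := by
        intro k
        induction k with
        | zero => simp
        | succ k ihk => rw [List.replicate_succ, List.foldl_cons, max_self]; exact ihk
      rw [hfold]
      rfl
  rw [hA, hmax]
  simp [best_itinerary_alt]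

-- ===== VERDICT (by name: the statement is the Claim_ definition above) =====
theorem best_itinerary_spec : Claim_equal_best_itinerary := by
  intro P Q H _ hpre
  obtain ⟨hne, hrest⟩ := hpre
  unfold Spec_best_itinerary
  rcases hrest with hnil | ⟨h0h, hh, hq, -⟩
  · subst hnil
    exact pv_nil Q H
  · have hmv : ∀ c : Nat, c < Q.length → 0 ≤ pvMove Q H (c:Int) := by
      intro c hc
      rw [pvMove_natCast]
      exact hq c hc
    by_cases hnil : P = []
    · subst hnil
      exact pv_nil Q H
    rw [pvA_value P Q H h0h (by exact_mod_cast hh) hmv,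
        pvB_value P Q H hnil h0h (by exact_mod_cast hh) hmv]
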